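-- pv_equiv track=rewrite | github.com/renyuneyun/pp-analyzer | pp-analyze/pp_analyze/website_compliance_evaluation.py | to_websites_by_num_conflicts
-- ===== SOURCE A (Python) =====
-- from collections import defaultdict
--
-- def to_websites_by_num_conflicts(conflicts, websites_of_interest) -> dict[int, list[str]]:
--     '''
--     Convert the conflicts dictionary to a dictionary of websites by number of conflicts (as key).
--     "Conflict" here means the number of conflicting personal profiles.
--     This indicates which websites have the same number of conflicts.
--     '''
--     num_persona_conflicts_per_website = {}
--     for ws in websites_of_interest:
--         num_persona_conflicts_per_website[ws] = 0
--     for persona, results in conflicts.items():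
--         for ws, res in results.items():
--             if ws in websites_of_interest:
--                 num_persona_conflicts_per_website[ws] += 1
--
--     websites_by_conflicts = defaultdict(list)
--     for ws, num_conflicts in num_persona_conflicts_per_website.items():
--         websites_by_conflicts[num_conflicts].append(ws)
--     websites_by_conflicts = dict(websites_by_conflicts)
--
--     return websites_by_conflicts
-- ===== SOURCE B (Python) =====
-- def to_websites_by_num_conflicts(conflicts, websites_of_interest) -> dict[int, list[str]]:
--     # Staged pipeline: dedup websites (first occurrence, as A's seeded dict does),
--     # count by a transposed membership scan, then build each group with a filter
--     # pass per distinct count (no seeded accumulator, no defaultdict).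
--     order = list(dict.fromkeys(websites_of_interest))
--     pairs = [(ws, sum(1 for results in conflicts.values() if ws in results)) for ws in order]
--     seen = list(dict.fromkeys(n for _, n in pairs))
--     return {n: [ws for ws, m in pairs if m == n] for n in seen}
-- ===== Notes on version B (the rewrite author's own statement) =====
-- stated objective: alternative
-- what changed: B is a staged pipeline with no mutable accumulators: dedup the websites, build a (website,count) list by a transposed per-website membership scan over personas, then emit each group with one filter pass per distinct count - A instead seeds a zero dict, increments it inside a persona-by-persona nested loop, and folds the counts into a defaultdict of lists.
import Mathlib
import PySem

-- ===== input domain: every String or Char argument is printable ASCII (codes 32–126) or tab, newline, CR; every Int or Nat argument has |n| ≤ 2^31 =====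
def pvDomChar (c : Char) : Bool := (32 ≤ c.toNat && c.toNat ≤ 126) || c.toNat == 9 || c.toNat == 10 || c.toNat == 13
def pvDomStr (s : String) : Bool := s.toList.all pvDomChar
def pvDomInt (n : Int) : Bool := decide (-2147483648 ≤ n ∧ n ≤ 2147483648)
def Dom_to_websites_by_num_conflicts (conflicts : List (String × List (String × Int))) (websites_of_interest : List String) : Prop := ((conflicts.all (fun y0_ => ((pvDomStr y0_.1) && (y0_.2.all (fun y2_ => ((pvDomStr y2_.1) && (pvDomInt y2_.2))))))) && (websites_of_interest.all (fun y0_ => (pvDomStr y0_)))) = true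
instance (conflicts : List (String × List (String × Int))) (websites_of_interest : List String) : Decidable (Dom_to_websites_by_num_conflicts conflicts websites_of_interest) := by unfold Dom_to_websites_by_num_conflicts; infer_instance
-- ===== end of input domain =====

-- ===== PORT A =====
-- B is a staged dedup/count/filter pipeline with no mutable accumulators, proved
-- equal on Pre_ to A's seeded-dict increment loops.
def to_websites_by_num_conflicts (conflicts : List (String × List (String × Int))) (websites_of_interest : List String) : List (Int × List String) :=
  -- num_persona_conflicts_per_website = {}; for ws in websites_of_interest: [ws] = 0
  let counts0 : PySem.Dict String Int :=
    websites_of_interest.foldl (fun d ws => d.insert ws 0) PySem.Dict.empty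
  -- for persona, results in conflicts.items(): for ws, res in results.items(): if ws in websites_of_interest: [ws] += 1
  let counts : PySem.Dict String Int :=
    conflicts.foldl (fun d pr =>
      pr.2.foldl (fun d p =>
        if websites_of_interest.contains p.1 then d.modify p.1 0 (· + 1) else d) d) counts0
  -- websites_by_conflicts = defaultdict(list); append loop; dict(...)
  let grouped : PySem.Dict Int (List String) :=
    counts.items.foldl (fun g q => g.modify q.2 [] (· ++ [q.1])) PySem.Dict.empty
  grouped.items

-- ===== PORT B =====
def to_websites_by_num_conflicts_alt (conflicts : List (String × List (String × Int))) (websites_of_interest : List String) : List (Int × List String) :=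
  -- order = list(dict.fromkeys(websites_of_interest))
  let order := PySem.List.dedup websites_of_interest
  -- pairs = [(ws, sum(1 for results in conflicts.values() if ws in results)) for ws in order]
  let pairs := order.map (fun ws =>
    (ws, ((conflicts.countP (fun pr => pr.2.any (fun p => p.1 == ws)) : Nat) : Int)))
  -- seen = list(dict.fromkeys(n for _, n in pairs))
  let seen := PySem.List.dedup (pairs.map Prod.snd)
  -- {n: [ws for ws, m in pairs if m == n] for n in seen}  (keys of seen are distinct,
  -- so the dict comprehension in insertion order is exactly this map)
  seen.map (fun n => (n, (pairs.filter (fun p => p.2 == n)).map Prod.fst))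

-- ===== PRECONDITION & SPEC =====
-- Pre_ excludes association lists in which one persona's results carry a duplicate
-- website key: a Python dict (A's actual input type) cannot hold duplicate keys,
-- so such lists do not correspond to any input A runs on.
def Pre_to_websites_by_num_conflicts (conflicts : List (String × List (String × Int))) (websites_of_interest : List String) : Prop :=
  ∀ pr ∈ conflicts, (pr.2.map Prod.fst).Nodup
instance (conflicts : List (String × List (String × Int))) (websites_of_interest : List String) : Decidable (Pre_to_websites_by_num_conflicts conflicts websites_of_interest) := by unfold Pre_to_websites_by_num_conflicts; infer_instance
def pvWitness_to_websites_by_num_conflicts : (List (String × List (String × Int))) × List String :=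
  ([("p1", [("a", 1), ("b", 2)]), ("p2", [("b", 3)])], ["a", "b", "c"])

def Spec_to_websites_by_num_conflicts (conflicts : List (String × List (String × Int))) (websites_of_interest : List String) (out : List (Int × List String)) : Prop := out = to_websites_by_num_conflicts_alt conflicts websites_of_interest
instance (conflicts : List (String × List (String × Int))) (websites_of_interest : List String) (out : List (Int × List String)) : Decidable (Spec_to_websites_by_num_conflicts conflicts websites_of_interest out) := by unfold Spec_to_websites_by_num_conflicts; infer_instance

-- ===== CLAIM (what is proved, stated in full; the proofs are below) =====
def Claim_equal_to_websites_by_num_conflicts : Prop := ∀ (conflicts : List (String × List (String × Int))) (websites_of_interest : List String), Dom_to_websites_by_num_conflicts conflicts websites_of_interest → Pre_to_websites_by_num_conflicts conflicts websites_of_interest → Spec_to_websites_by_num_conflicts conflicts websites_of_interest (to_websites_by_num_conflicts conflicts websites_of_interest)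

-- ===== LEMMAS AND PROOFS =====

-- A-side inner step: increment-if-of-interest over one persona's results
def pvStepA (websites_of_interest : List String) (d : PySem.Dict String Int) (p : String × Int) : PySem.Dict String Int :=
  if websites_of_interest.contains p.1 then d.modify p.1 0 (· + 1) else d

-- the websites a persona's results increment, in order
def pvKeysOf (websites_of_interest : List String) (pr : String × List (String × Int)) : List String :=
  (pr.2.map Prod.fst).filter (fun x => websites_of_interest.contains x)

-- B's per-website count, named for the proofs
def pvCnt (conflicts : List (String × List (String × Int))) (ws : String) : Int :=
  ((conflicts.countP (fun pr => pr.2.any (fun p => p.1 == ws)) : Nat) : Int)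

lemma pv_inner_fold (w : List String) (l : List (String × Int)) :
    ∀ d : PySem.Dict String Int,
      l.foldl (pvStepA w) d
        = ((l.map Prod.fst).filter (fun x => w.contains x)).foldl
            (fun d x => d.modify x 0 (· + 1)) d := by
  induction l with
  | nil => intro d; rfl
  | cons h t ih =>
      intro d
      by_cases hc : h.1 ∈ w <;> simp [pvStepA, hc, ih]

lemma pv_getA (w : List String) (v : String) :
    ∀ (conflicts : List (String × List (String × Int))) (d : PySem.Dict String Int),
      (conflicts.foldl (fun d pr => pr.2.foldl (pvStepA w) d) d).getD v 0
        = d.getD v 0 + ((conflicts.flatMap (pvKeysOf w)).count v : Int) := by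
  intro conflicts
  induction conflicts with
  | nil => intro d; simp
  | cons pr rest ih =>
      intro d
      rw [List.foldl_cons, ih, List.flatMap_cons, List.count_append, pv_inner_fold,
        PySem.Dict.getD_foldl_modify_add_one]
      simp only [pvKeysOf]
      push_cast
      ring

lemma pv_update_eq_self (s : PySem.Set String) :
    ∀ l : List String, (∀ x ∈ l, x ∈ s) → PySem.Set.update s l = s := by
  intro l
  induction l generalizing s with
  | nil => intro _; rfl
  | cons h t ih =>
      intro hm
      have : s.add h = s := PySem.Set.add_of_mem (hm h (by simp))
      simp only [PySem.Set.update, List.foldl_cons, this]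
      exact ih s (fun x hx => hm x (by simp [hx]))

lemma pv_keysA (w : List String) (conflicts : List (String × List (String × Int))) :
    ∀ d : PySem.Dict String Int,
      (conflicts.foldl (fun d pr => pr.2.foldl (pvStepA w) d) d).keys
        = PySem.Set.update d.keys (conflicts.flatMap (pvKeysOf w)) := by
  induction conflicts with
  | nil => intro d; rfl
  | cons pr rest ih =>
      intro d
      have hinner : (pr.2.foldl (pvStepA w) d).keys
          = PySem.Set.update d.keys (pvKeysOf w pr) := by
        rw [pv_inner_fold]
        exact PySem.Dict.keys_foldl_modify _ 0 (fun _ _ => (· + 1)) d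
      simp only [List.foldl_cons, List.flatMap_cons, ih, hinner, PySem.Set.update,
        List.foldl_append]

lemma pv_getIns (f : String → Int) :
    ∀ (w : List String) (d : PySem.Dict String Int) (v : String),
      (w.foldl (fun d ws => d.insert ws (f ws)) d).getD v 0
        = if v ∈ w then f v else d.getD v 0 := by
  intro w
  induction w with
  | nil => intro d v; simp
  | cons h t ih =>
      intro d v
      by_cases hv : v ∈ t
      · simp [ih, hv]
      · by_cases he : v = h <;> simp [ih, hv, PySem.Dict.getD_insert, he]

lemma pv_cnt (w : List String) (v : String) (hv : v ∈ w) :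
    ∀ conflicts : List (String × List (String × Int)),
      (∀ pr ∈ conflicts, (pr.2.map Prod.fst).Nodup) →
      ((conflicts.flatMap (pvKeysOf w)).count v : Int) = pvCnt conflicts v := by
  intro conflicts
  induction conflicts with
  | nil => intro _; rfl
  | cons pr rest ih =>
      intro hnd
      have hhead : (pvKeysOf w pr).count v = if v ∈ pr.2.map Prod.fst then 1 else 0 := by
        rw [pvKeysOf, List.count_filter (by exact List.elem_eq_true_of_mem hv)]
        exact List.Nodup.count (hnd pr (by simp))
      have hany : (pr.2.any (fun p => p.1 == v)) = decide (v ∈ pr.2.map Prod.fst) := by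
        rw [Bool.eq_iff_iff]
        constructor
        · intro h
          rcases List.any_eq_true.mp h with ⟨p, hp, he⟩
          exact decide_eq_true (List.mem_map.mpr ⟨p, hp, (by simpa using he)⟩)
        · intro h
          rcases List.mem_map.mp (of_decide_eq_true h) with ⟨p, hp, he⟩
          exact List.any_eq_true.mpr ⟨p, hp, by simp [he]⟩
      have ih' := ih (fun q hq => hnd q (by simp [hq]))
      simp only [List.flatMap_cons, List.count_append, pvCnt, List.countP_cons, hhead, hany] at *
      by_cases hm : v ∈ pr.2.map Prod.fst <;> simp [hm] at * <;> omega

-- A's count dictionary, as the explicit pair list B builds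
lemma pv_counts_items (conflicts : List (String × List (String × Int)))
    (w : List String)
    (hpre : ∀ pr ∈ conflicts, (pr.2.map Prod.fst).Nodup) :
    (conflicts.foldl (fun d pr => pr.2.foldl (pvStepA w) d)
        (w.foldl (fun d ws => d.insert ws 0) PySem.Dict.empty)).items
      = (PySem.List.dedup w).map (fun ws => (ws, pvCnt conflicts ws)) := by
  set C := conflicts.foldl (fun d pr => pr.2.foldl (pvStepA w) d)
      (w.foldl (fun d ws => d.insert ws (0 : Int)) PySem.Dict.empty) with hC
  have hk0 : (w.foldl (fun d ws => d.insert ws (0 : Int)) PySem.Dict.empty).keys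
      = PySem.Set.ofList w := by
    rw [PySem.Dict.keys_foldl_insert]; rfl
  have hkA : C.keys = PySem.Set.ofList w := by
    rw [hC, pv_keysA, hk0, pv_update_eq_self]
    intro x hx
    rw [PySem.Set.mem_ofList]
    rcases List.mem_flatMap.mp hx with ⟨pr, _, hxp⟩
    simp only [pvKeysOf, List.mem_filter] at hxp
    exact List.mem_of_elem_eq_true hxp.2
  rw [PySem.Dict.items_eq_map_keys C (by rw [hkA]; exact PySem.Set.nodup_ofList w) 0, hkA,
    PySem.List.dedup_eq_ofList]
  apply List.map_congr_left
  intro k hk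
  have hkw : k ∈ w := (PySem.Set.mem_ofList w k).mp hk
  have h0 := pv_getIns (fun _ => (0 : Int)) w PySem.Dict.empty k
  simp only [hkw, if_pos] at h0
  rw [hC, pv_getA, h0, pv_cnt w k hkw conflicts hpre]
  simp

-- A's grouping fold over any pair list, characterised as B's dedup+filter pipeline
lemma pv_group (pairs : List (String × Int)) :
    (pairs.foldl (fun g q => g.modify q.2 [] (· ++ [q.1])) PySem.Dict.empty).items
      = (PySem.List.dedup (pairs.map Prod.snd)).map
          (fun n => (n, (pairs.filter (fun p => p.2 == n)).map Prod.fst)) := by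
  set G := pairs.foldl (fun g q => g.modify q.2 [] (· ++ [q.1])) PySem.Dict.empty with hG
  have hswap : G = (pairs.map (fun q => (q.2, q.1))).foldl
      (fun g p => g.modify p.1 [] (· ++ [p.2])) PySem.Dict.empty := by
    rw [List.foldl_map]
  have hkeys : G.keys = PySem.Set.ofList (pairs.map Prod.snd) := by
    rw [hG, PySem.Dict.keys_foldl_modify_key]
    rfl
  rw [PySem.Dict.items_eq_map_keys G (by rw [hkeys]; exact PySem.Set.nodup_ofList _) [],
    hkeys, PySem.List.dedup_eq_ofList]
  apply List.map_congr_left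
  intro n _
  rw [hswap, PySem.Dict.getD_foldl_modify_append]
  simp [List.filter_map, Function.comp_def]

-- ===== VERDICT (by name: the statement is the Claim_ definition above) =====
theorem to_websites_by_num_conflicts_spec : Claim_equal_to_websites_by_num_conflicts := by
  intro conflicts w _ hpre
  unfold Spec_to_websites_by_num_conflicts
  unfold to_websites_by_num_conflicts to_websites_by_num_conflicts_alt
  have hitems := pv_counts_items conflicts w hpre
  unfold pvStepA at hitems
  simp only [pv_group, hitems, List.map_map, List.filter_map, Function.comp_def, pvCnt]
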